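-- pv_equiv track=rewrite | github.com/Tiexin-RS/segment-with-nn | segelectri/data_loader/utils/manipulate_img_op.py | generate_crop_boxes
-- ===== SOURCE A (Python) =====
-- from typing import List, Tuple
--
-- def get_available_stuff(dim_length: int, useless_padding: int, box_length: int):
--     """helper function of get available stuff for generate_crop_boxes
--
--     Args:
--         length (int): total length for height or width
--         useless_padding (int): useless padding along length
--         box_length (int): box length along this dim
--     """
--     curr_idx = useless_padding
--     available_stuff = []
--     while curr_idx + box_length + useless_padding <= dim_length:
--         available_stuff.append(curr_idx)
--         curr_idx += box_length
--     return available_stuff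
--
-- def generate_crop_boxes(\
--     img_shape: Tuple[int, int],
--     useless_padding: Tuple[int, int],
--     box_shape: Tuple[int, int]):
--     """generate crop boxes
--
--     Args:
--         img_shape (Tuple): input img shape
--         useless_padding (int): useless padding around the img
--         box_shape (Tuple): box shape
--
--     Returns:
--         num_box (int): number of boxes
--         boxes (List shape: [num_box, 4]): coordinates of boxes
--     """
--     useless_padding = [0 if u <= 0 else u for u in useless_padding]
--     width_available = get_available_stuff(img_shape[0], useless_padding[0],
--                                           box_shape[0])
--     height_available = get_available_stuff(img_shape[1], useless_padding[1],
--                                            box_shape[1])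
--
--     boxes = []
--     box_width = box_shape[0]
--     box_height = box_shape[1]
--     for w in width_available:
--         for h in height_available:
--             boxes.append([h, w, h + box_height, w + box_width])
--
--     num_box = len(height_available) * len(width_available)
--     return num_box, boxes
-- ===== SOURCE B (Python) =====
-- def generate_crop_boxes(img_shape, useless_padding, box_shape):
--     def offsets(dim_length, pad, box_length):
--         pad = pad if pad > 0 else 0
--         if box_length <= 0:
--             return []
--         count = max(0, (dim_length - 2 * pad - box_length) // box_length + 1)
--         return [pad + i * box_length for i in range(count)]
--
--     ws = offsets(img_shape[0], useless_padding[0], box_shape[0])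
--     hs = offsets(img_shape[1], useless_padding[1], box_shape[1])
--     bw, bh = box_shape
--     boxes = [[h, w, h + bh, w + bw] for w in ws for h in hs]
--     return len(ws) * len(hs), boxes
-- ===== Notes on version B (the rewrite author's own statement) =====
-- stated objective: simpler
-- what changed: The step-by-step while-loop accumulation of grid offsets is replaced by a closed-form count ((dim - 2*pad - box)//box + 1, clamped at 0) with the offsets generated arithmetically as pad + i*box; the box list becomes a single comprehension.
import Mathlib
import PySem

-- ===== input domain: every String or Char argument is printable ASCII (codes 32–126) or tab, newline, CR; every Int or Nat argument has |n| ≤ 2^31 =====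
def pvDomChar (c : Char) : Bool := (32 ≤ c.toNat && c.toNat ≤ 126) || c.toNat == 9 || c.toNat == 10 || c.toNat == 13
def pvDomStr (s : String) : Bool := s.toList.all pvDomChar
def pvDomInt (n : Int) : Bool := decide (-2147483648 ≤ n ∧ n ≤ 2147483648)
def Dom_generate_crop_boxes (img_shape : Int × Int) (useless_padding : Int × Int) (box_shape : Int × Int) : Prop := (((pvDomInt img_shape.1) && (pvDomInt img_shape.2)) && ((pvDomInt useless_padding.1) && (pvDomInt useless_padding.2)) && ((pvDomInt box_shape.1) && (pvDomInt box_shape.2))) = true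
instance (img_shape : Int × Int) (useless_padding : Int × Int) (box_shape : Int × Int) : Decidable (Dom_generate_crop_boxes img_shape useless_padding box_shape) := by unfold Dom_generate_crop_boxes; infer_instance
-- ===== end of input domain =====

-- B replaces A's step-by-step while-loop offset accumulation by a closed-form count and
-- arithmetically generated offsets (objective: simpler). Return value only; no mutation.

-- ===== PORT A =====
-- A's while loop 'while curr + box + pad <= dim: append curr; curr += box', transcribed with a
-- fuel parameter that only makes the recursion total; under Pre_ the fuel is never exhausted.
def availGo (dim pad box : Int) : Int → Nat → List Int → List Int
  | _, 0, acc => acc.reverse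
  | curr, n+1, acc =>
      if curr + box + pad ≤ dim then availGo dim pad box (curr + box) n (curr :: acc)
      else acc.reverse

def get_available_stuff (dim_length useless_padding box_length : Int) : List Int :=
  availGo dim_length useless_padding box_length useless_padding
    ((dim_length - 2 * useless_padding - box_length).toNat + 1) []

def generate_crop_boxes (img_shape : Int × Int) (useless_padding : Int × Int) (box_shape : Int × Int) : Int × List (List Int) :=
  let u0 : Int := if useless_padding.1 ≤ 0 then 0 else useless_padding.1
  let u1 : Int := if useless_padding.2 ≤ 0 then 0 else useless_padding.2
  let width_available := get_available_stuff img_shape.1 u0 box_shape.1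
  let height_available := get_available_stuff img_shape.2 u1 box_shape.2
  let box_width := box_shape.1
  let box_height := box_shape.2
  let boxes := width_available.foldl (fun acc w =>
    height_available.foldl (fun acc h => acc ++ [[h, w, h + box_height, w + box_width]]) acc) []
  ((height_available.length : Int) * (width_available.length : Int), boxes)

-- ===== PORT B =====
def offsetsB (dim_length pad box_length : Int) : List Int :=
  let p : Int := if pad > 0 then pad else 0
  if box_length ≤ 0 then []
  else
    let count : Int := max 0 (PySem.Int.floordiv (dim_length - 2 * p - box_length) box_length + 1)
    (List.range count.toNat).map (fun (i : Nat) => p + (i : Int) * box_length)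

def generate_crop_boxes_alt (img_shape : Int × Int) (useless_padding : Int × Int) (box_shape : Int × Int) : Int × List (List Int) :=
  let ws := offsetsB img_shape.1 useless_padding.1 box_shape.1
  let hs := offsetsB img_shape.2 useless_padding.2 box_shape.2
  let bw := box_shape.1
  let bh := box_shape.2
  let boxes := ws.flatMap (fun w => hs.map (fun h => [h, w, h + bh, w + bw]))
  ((ws.length : Int) * (hs.length : Int), boxes)

-- ===== PRECONDITION & SPEC =====
-- Pre_ excludes exactly the inputs where A's while loop never terminates: a dimension with
-- box length ≤ 0 whose first box fits (then curr never advances past the bound). A returns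
-- on precisely the inputs satisfying Pre_.
def Pre_generate_crop_boxes (img_shape : Int × Int) (useless_padding : Int × Int) (box_shape : Int × Int) : Prop :=
  (0 < box_shape.1 ∨ img_shape.1 < 2 * (max useless_padding.1 0) + box_shape.1) ∧
  (0 < box_shape.2 ∨ img_shape.2 < 2 * (max useless_padding.2 0) + box_shape.2)

instance (img_shape : Int × Int) (useless_padding : Int × Int) (box_shape : Int × Int) : Decidable (Pre_generate_crop_boxes img_shape useless_padding box_shape) := by unfold Pre_generate_crop_boxes; infer_instance

def pvWitness_generate_crop_boxes : (Int × Int) × (Int × Int) × (Int × Int) := ((10, 7), (1, 0), (3, 2))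

def Spec_generate_crop_boxes (img_shape : Int × Int) (useless_padding : Int × Int) (box_shape : Int × Int) (out : Int × List (List Int)) : Prop := out = generate_crop_boxes_alt img_shape useless_padding box_shape
instance (img_shape : Int × Int) (useless_padding : Int × Int) (box_shape : Int × Int) (out : Int × List (List Int)) : Decidable (Spec_generate_crop_boxes img_shape useless_padding box_shape out) := by unfold Spec_generate_crop_boxes; infer_instance

-- ===== CLAIM (what is proved, stated in full; the proofs are below) =====
def Claim_equal_generate_crop_boxes : Prop := ∀ (img_shape : Int × Int) (useless_padding : Int × Int) (box_shape : Int × Int), Dom_generate_crop_boxes img_shape useless_padding box_shape → Pre_generate_crop_boxes img_shape useless_padding box_shape → Spec_generate_crop_boxes img_shape useless_padding box_shape (generate_crop_boxes img_shape useless_padding box_shape)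

-- ===== LEMMAS AND PROOFS =====

-- While-loop characterisation: with a positive step and enough fuel, availGo from curr produces
-- exactly the arithmetic progression of length (floordiv (dim - pad - box - curr) box + 1).toNat.
lemma availGo_eq (dim pad box : Int) (hb : 0 < box) :
    ∀ (fuel : Nat) (curr : Int) (acc : List Int),
      (PySem.Int.floordiv (dim - pad - box - curr) box + 1).toNat ≤ fuel →
      availGo dim pad box curr fuel acc
        = acc.reverse ++ (List.range (PySem.Int.floordiv (dim - pad - box - curr) box + 1).toNat).map
            (fun (i : Nat) => curr + (i : Int) * box) := by
  intro fuel
  induction fuel with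
  | zero =>
      intro curr acc h
      have h0 : (PySem.Int.floordiv (dim - pad - box - curr) box + 1).toNat = 0 :=
        Nat.le_zero.mp h
      simp [availGo, h0]
  | succ n ih =>
      intro curr acc h
      set x : Int := dim - pad - box - curr with hx
      by_cases hc : curr + box + pad ≤ dim
      · have hx0 : 0 ≤ x := by omega
        have hfd0 : 0 ≤ PySem.Int.floordiv x box :=
          (PySem.Int.le_floordiv_iff_mul_le hb).mpr (by linarith)
        have hbr := (PySem.Int.floordiv_eq_iff_of_pos (a := x) hb).mp rfl
        have hstep : PySem.Int.floordiv (x - box) box = PySem.Int.floordiv x box - 1 := by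
          rw [PySem.Int.floordiv_eq_iff_of_pos hb]
          constructor <;> nlinarith [hbr.1, hbr.2]
        have hx' : dim - pad - box - (curr + box) = x - box := by omega
        have hN : (PySem.Int.floordiv x box + 1).toNat
            = (PySem.Int.floordiv (x - box) box + 1).toNat + 1 := by
          rw [hstep]; omega
        have hfuel : (PySem.Int.floordiv (x - box) box + 1).toNat ≤ n := by omega
        have ihh := ih (curr + box) (curr :: acc) (by rw [hx']; exact hfuel)
        rw [hx'] at ihh
        simp only [availGo, if_pos hc, ihh, hN, List.range_succ_eq_map, List.map_cons,
          List.map_map, List.reverse_cons, List.append_assoc, List.singleton_append]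
        congr 1
        congr 1
        · push_cast; ring
        · apply List.map_congr_left
          intro i _
          simp only [Function.comp]
          push_cast; ring
      · have hxneg : x < 0 := by omega
        have : PySem.Int.floordiv x box < 0 :=
          (PySem.Int.floordiv_lt_iff_lt_mul hb).mpr (by linarith)
        have h0 : (PySem.Int.floordiv x box + 1).toNat = 0 := by omega
        simp [availGo, if_neg hc, h0]

-- The fuel chosen in get_available_stuff suffices.
lemma fuel_ok (dim pad box : Int) (hb : 0 < box) :
    (PySem.Int.floordiv (dim - 2 * pad - box) box + 1).toNat
      ≤ (dim - 2 * pad - box).toNat + 1 := by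
  set x : Int := dim - 2 * pad - box with hx
  by_cases hx0 : 0 ≤ x
  · have hbr := (PySem.Int.floordiv_eq_iff_of_pos (a := x) hb).mp rfl
    have : PySem.Int.floordiv x box ≤ x := by nlinarith [hbr.1, hbr.2]
    omega
  · have : PySem.Int.floordiv x box < 0 :=
      (PySem.Int.floordiv_lt_iff_lt_mul hb).mpr (by linarith)
    omega

-- Per-dimension agreement (pad already clamped: 0 ≤ p), under the per-dimension precondition.
lemma avail_eq_offsets (dim pad box : Int)
    (hpre : 0 < box ∨ dim < 2 * (max pad 0) + box) :
    get_available_stuff dim (if pad ≤ 0 then 0 else pad) box = offsetsB dim pad box := by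
  have hp : (if pad ≤ 0 then (0:Int) else pad) = max pad 0 := by
    split <;> omega
  rw [hp]
  set p : Int := max pad 0 with hpdef
  have hp2 : (if pad > 0 then pad else (0:Int)) = p := by
    rw [hpdef]; split <;> omega
  by_cases hb : 0 < box
  · unfold get_available_stuff offsetsB
    rw [availGo_eq dim p box hb _ p [] (by
      have := fuel_ok dim p box hb
      have hxe : dim - p - box - p = dim - 2 * p - box := by ring
      rw [hxe]; exact this)]
    rw [List.reverse_nil, List.nil_append]
    simp only [hp2, if_neg (by omega : ¬ box ≤ 0)]
    have hxe : dim - p - box - p = dim - 2 * p - box := by ring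
    rw [hxe]
    have hcnt : (max 0 (PySem.Int.floordiv (dim - 2 * p - box) box + 1)).toNat
        = (PySem.Int.floordiv (dim - 2 * p - box) box + 1).toNat := by omega
    rw [hcnt]
  · -- box ≤ 0: Pre gives dim < 2*p + box, so the loop guard fails immediately and both are [].
    have hlt : dim < 2 * p + box := by
      rcases hpre with h | h
      · omega
      · exact h
    unfold get_available_stuff offsetsB
    simp only [hp2, if_pos (by omega : box ≤ 0)]
    have : ¬ (p + box + p ≤ dim) := by omega
    unfold availGo
    simp [this]

-- ===== VERDICT (by name: the statement is the Claim_ definition above) =====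
theorem generate_crop_boxes_spec : Claim_equal_generate_crop_boxes := by
  intro img pad box _ hpre
  unfold Spec_generate_crop_boxes generate_crop_boxes generate_crop_boxes_alt
  have hw := avail_eq_offsets img.1 pad.1 box.1 hpre.1
  have hh := avail_eq_offsets img.2 pad.2 box.2 hpre.2
  simp only [hw, hh, Prod.mk.injEq]
  constructor
  · ring
  · simp only [PySem.List.foldl_append_singleton_eq_map]
    rw [show (fun (acc : List (List Int)) (w : Int) =>
          acc ++ (offsetsB img.2 pad.2 box.2).map (fun h => [h, w, h + box.2, w + box.1]))
        = (fun acc w => acc ++ (fun w => (offsetsB img.2 pad.2 box.2).map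
            (fun h => [h, w, h + box.2, w + box.1])) w) from rfl,
      PySem.List.foldl_append_eq_flatMap]
    simp
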